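-- pv_equiv track=rewrite | github.com/Svyatocheck/Optimization-Algos-Degustation | utill/optimization.py | calculate_class_neighbors_penalty
-- ===== SOURCE A (Python) =====
-- def calculate_class_neighbors_penalty(timetable, data):
--     penalty = 0
--     GAP_PENALTY = 10  # Define a penalty value for each gap
--
--     for course, lectures in timetable.items():
--         if isinstance(lectures, list) and lectures and isinstance(lectures[0], (list, tuple)):
--             lectures = [tuple(lecture) for lecture in lectures]
--         else:
--             lectures = [tuple(lectures)]
--
--         # Filter out non-tuple elements
--         lectures = [l for l in lectures if isinstance(l, tuple) and len(l) >= 2]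
--
--         # Sort lectures by day and timeslot for sequential analysis
--         sorted_lectures = sorted(lectures, key=lambda x: (x[0], x[1]))  # x[0] is day, x[1] is timeslot
--
--         for i in range(len(sorted_lectures) - 1):
--             current_day, current_timeslot = sorted_lectures[i][0], sorted_lectures[i][1]
--             next_day, next_timeslot = sorted_lectures[i + 1][0], sorted_lectures[i + 1][1]
--             # Check for gaps on the same day
--             if current_day == next_day and next_timeslot - current_timeslot > 1:
--                 penalty += GAP_PENALTY  # Add penalty for each gap
--
--     return penalty
-- ===== SOURCE B (Python) =====
-- def calculate_class_neighbors_penalty(timetable, data):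
--     penalty = 0
--     GAP_PENALTY = 10
--
--     for course, lectures in timetable.items():
--         if isinstance(lectures, list) and lectures and isinstance(lectures[0], (list, tuple)):
--             lectures = [tuple(lecture) for lecture in lectures]
--         else:
--             lectures = [tuple(lectures)]
--         lectures = [l for l in lectures if isinstance(l, tuple) and len(l) >= 2]
--
--         # Group by day instead of one global (day, timeslot) sort:
--         pairs = [(l[0], l[1]) for l in lectures]
--         days = []
--         for d, _t in pairs:
--             if d not in days:
--                 days.append(d)
--         for d in days:
--             slots = sorted(t for dd, t in pairs if dd == d)
--             for a, b in zip(slots, slots[1:]):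
--                 if b - a > 1:
--                     penalty += GAP_PENALTY
--
--     return penalty
-- ===== Notes on version B (the rewrite author's own statement) =====
-- stated objective: alternative
-- what changed: Replaces the single global (day, timeslot) sort followed by one adjacent-pair scan with a by-day grouping: collect each day's timeslots, sort each day's list separately and count adjacent gaps per day.
import Mathlib
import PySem

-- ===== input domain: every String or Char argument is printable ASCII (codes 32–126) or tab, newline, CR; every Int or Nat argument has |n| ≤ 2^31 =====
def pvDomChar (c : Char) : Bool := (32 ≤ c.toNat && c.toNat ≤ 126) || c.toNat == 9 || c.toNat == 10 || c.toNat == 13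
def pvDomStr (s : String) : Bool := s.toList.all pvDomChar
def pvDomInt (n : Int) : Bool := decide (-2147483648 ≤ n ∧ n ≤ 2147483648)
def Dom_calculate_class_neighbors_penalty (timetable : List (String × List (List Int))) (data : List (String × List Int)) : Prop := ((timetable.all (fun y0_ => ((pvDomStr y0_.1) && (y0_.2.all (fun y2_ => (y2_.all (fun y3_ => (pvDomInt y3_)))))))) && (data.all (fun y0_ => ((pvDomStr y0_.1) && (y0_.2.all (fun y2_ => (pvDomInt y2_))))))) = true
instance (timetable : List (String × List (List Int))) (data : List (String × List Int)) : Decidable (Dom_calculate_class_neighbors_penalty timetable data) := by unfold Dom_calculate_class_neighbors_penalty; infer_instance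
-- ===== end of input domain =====

-- B groups lectures by day (first-occurrence day list) and scans each day's sorted timeslot
-- list, instead of A's single global (day, timeslot) sort with one adjacent-pair scan; alternative decomposition, same results.

-- ===== PORT A =====
-- In our typed model `lectures` is always a Python list of lists, so
-- `isinstance(lectures, list) and lectures and isinstance(lectures[0], (list, tuple))`
-- reduces to nonemptiness, and `tuple(lecture)` is the identity; on the empty list the
-- else-branch yields `[tuple([])] = [()]`, modelled as `[[]]` (removed by the len >= 2 filter).
def calculate_class_neighbors_penalty (timetable : List (String × List (List Int))) (data : List (String × List Int)) : Int :=
  timetable.foldl (fun penalty cl =>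
    let lectures := cl.2
    let lectures := if lectures.isEmpty = false then lectures else [([] : List Int)]
    let lectures := lectures.filter (fun l => decide (2 ≤ l.length))
    let sorted_lectures := PySem.List.sorted2 lectures (fun x => x.getD 0 0) (fun x => x.getD 1 0)
    -- x[0], x[1] via getD: every kept lecture has length >= 2, so the index is in range (exact)
    (PySem.List.pyRange 0 ((sorted_lectures.length : Int) - 1) 1).foldl (fun pen i =>
      let cur := PySem.List.pyGetD sorted_lectures i []
      let nxt := PySem.List.pyGetD sorted_lectures (i + 1) []
      if cur.getD 0 0 = nxt.getD 0 0 ∧ nxt.getD 1 0 - cur.getD 1 0 > 1 then pen + 10 else pen)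
      penalty) 0

-- ===== PORT B =====
def calculate_class_neighbors_penalty_alt (timetable : List (String × List (List Int))) (data : List (String × List Int)) : Int :=
  timetable.foldl (fun penalty cl =>
    let lectures := cl.2
    -- same normalization prelude as A (see the comment on port A)
    let lectures := if lectures.isEmpty = false then lectures else [([] : List Int)]
    let lectures := lectures.filter (fun l => decide (2 ≤ l.length))
    let pairs := lectures.map (fun l => (l.getD 0 0, l.getD 1 0))
    -- `if d not in days: days.append(d)` is exactly PySem.Set.add
    let days := pairs.foldl (fun ds p => PySem.Set.add ds p.1) PySem.Set.empty
    days.foldl (fun pen d =>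
      let slots := PySem.List.sorted ((pairs.filter (fun p => decide (p.1 = d))).map Prod.snd) (fun t => t)
      -- zip(slots, slots[1:]) ; slots[1:] = slots.tail
      (slots.zip slots.tail).foldl (fun pen2 ab => if ab.2 - ab.1 > 1 then pen2 + 10 else pen2) pen)
      penalty) 0

-- ===== PRECONDITION & SPEC =====
def Spec_calculate_class_neighbors_penalty (timetable : List (String × List (List Int))) (data : List (String × List Int)) (out : Int) : Prop := out = calculate_class_neighbors_penalty_alt timetable data
instance (timetable : List (String × List (List Int))) (data : List (String × List Int)) (out : Int) : Decidable (Spec_calculate_class_neighbors_penalty timetable data out) := by unfold Spec_calculate_class_neighbors_penalty; infer_instance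

-- ===== CLAIM (what is proved, stated in full; the proofs are below) =====
def Claim_equal_calculate_class_neighbors_penalty : Prop := ∀ (timetable : List (String × List (List Int))) (data : List (String × List Int)), Dom_calculate_class_neighbors_penalty timetable data → Spec_calculate_class_neighbors_penalty timetable data (calculate_class_neighbors_penalty timetable data)

-- ===== LEMMAS AND PROOFS =====

-- projection to the (day, timeslot) key
def pvKey (l : List Int) : Int × Int := (l.getD 0 0, l.getD 1 0)

-- A's count, structurally: same-day adjacent gaps of a (day, timeslot) list
def pvGaps : List (Int × Int) → Int
  | [] => 0
  | [_] => 0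
  | x :: y :: r => (if x.1 = y.1 ∧ y.2 - x.2 > 1 then 10 else 0) + pvGaps (y :: r)

-- B's per-day count: adjacent gaps of a timeslot list
def pvG : List Int → Int
  | [] => 0
  | [_] => 0
  | a :: b :: r => (if b - a > 1 then 10 else 0) + pvG (b :: r)

def pvSlots (d : Int) (S : List (Int × Int)) : List Int :=
  (S.filter (fun p => decide (p.1 = d))).map Prod.snd

def pvLexLe (a b : Int × Int) : Prop := a.1 < b.1 ∨ (a.1 = b.1 ∧ a.2 ≤ b.2)

theorem pv_slots_cons (d : Int) (p : Int × Int) (S : List (Int × Int)) :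
    pvSlots d (p :: S) = if p.1 = d then p.2 :: pvSlots d S else pvSlots d S := by
  by_cases h : p.1 = d <;> simp [pvSlots, h]

theorem pv_slots_nil_of_not_mem (d : Int) (S : List (Int × Int)) (h : d ∉ S.map Prod.fst) :
    pvSlots d S = [] := by
  simp only [pvSlots, List.map_eq_nil_iff, List.filter_eq_nil_iff]
  intro p hp hdec
  exact h (List.mem_map.mpr ⟨p, hp, by simpa using hdec⟩)

-- A's index loop equals the structural count (Nat-index version)
theorem pv_natfold (T : List (List Int)) (pen : Int) :
    (List.range (T.length - 1)).foldl (fun a i =>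
      if (T.getD i []).getD 0 0 = (T.getD (i + 1) []).getD 0 0 ∧
         (T.getD (i + 1) []).getD 1 0 - (T.getD i []).getD 1 0 > 1 then a + 10 else a)
      pen = pen + pvGaps (T.map pvKey) := by
  induction T generalizing pen with
  | nil => simp [pvGaps]
  | cons x t ih =>
    cases t with
    | nil => simp [pvGaps]
    | cons y r =>
      have hlen : (x :: y :: r).length - 1 = (y :: r).length - 1 + 1 := by
        simp
      rw [hlen, List.range_succ_eq_map, List.foldl_cons, List.foldl_map]
      set L := y :: r with hL
      simp only [Nat.succ_eq_add_one, List.getD_cons_succ]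
      rw [ih]
      simp only [hL, List.getD_cons_zero]
      have : pvGaps ((x :: y :: r).map pvKey)
          = (if x.getD 0 0 = y.getD 0 0 ∧ y.getD 1 0 - x.getD 1 0 > 1 then (10:Int) else 0)
            + pvGaps ((y :: r).map pvKey) := by
        simp [pvGaps, pvKey]
      rw [this]
      split_ifs with hc
      · ring
      · ring

-- A's pyRange loop reduces to the Nat-index loop
theorem pv_rangefold (T : List (List Int)) (pen : Int) :
    (PySem.List.pyRange 0 ((T.length : Int) - 1) 1).foldl (fun pen i =>
      let cur := PySem.List.pyGetD T i []
      let nxt := PySem.List.pyGetD T (i + 1) []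
      if cur.getD 0 0 = nxt.getD 0 0 ∧ nxt.getD 1 0 - cur.getD 1 0 > 1 then pen + 10 else pen)
      pen = pen + pvGaps (T.map pvKey) := by
  cases T with
  | nil => simp [PySem.List.pyRange, pvGaps]
  | cons x t =>
    have hcast : ((x :: t).length : Int) - 1 = ((t.length : Nat) : Int) := by
      simp
    rw [hcast, PySem.List.pyRange_zero_natCast, List.foldl_map]
    have h2 : t.length = (x :: t).length - 1 := by simp
    rw [← pv_natfold (x :: t) pen, ← h2]
    apply PySem.List.foldl_congr_mem
    intro acc i _
    have g1 : PySem.List.pyGetD (x :: t) (↑i) [] = (x :: t).getD i [] :=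
      PySem.List.pyGetD_natCast _ _ _
    have g2 : PySem.List.pyGetD (x :: t) ((↑i : Int) + 1) [] = (x :: t).getD (i + 1) [] := by
      rw [show ((i : Int) + 1) = ((i + 1 : Nat) : Int) by push_cast; ring]
      exact PySem.List.pyGetD_natCast _ _ _
    simp only [g1, g2]

-- sorted2 with Int keys is sorted with the lexicographic key
theorem pv_sorted2_eq_lex (xs : List (List Int)) :
    PySem.List.sorted2 xs (fun x => x.getD 0 0) (fun x => x.getD 1 0) =
      PySem.List.sorted xs (fun x => toLex (pvKey x)) := by
  simp only [PySem.List.sorted2, PySem.List.sorted]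
  congr 1
  funext acc x
  congr 1
  funext a b
  simp [pvKey, Prod.Lex.toLex_lt_toLex]
  rw [Bool.eq_iff_iff]
  simp only [Bool.or_eq_true, Bool.and_eq_true, Bool.not_eq_true', decide_eq_true_eq,
    decide_eq_false_iff_not]
  omega

-- main decomposition: on a lex-sorted list, the adjacent-pair count is the
-- sum of per-day counts over any duplicate-free list D of the days
theorem pv_main (S : List (Int × Int)) (D : List Int) (h : S.Pairwise pvLexLe)
    (hD : D.Nodup) (hmem : ∀ d, d ∈ D ↔ d ∈ S.map Prod.fst) :
    pvGaps S = (D.map (fun d => pvG (pvSlots d S))).sum := by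
  induction S generalizing D with
  | nil =>
    have hD0 : D = [] := by
      cases D with
      | nil => rfl
      | cons d t => exact absurd ((hmem d).mp (by simp)) (by simp)
    simp [hD0, pvGaps]
  | cons p S' ih =>
    have hp1D : p.1 ∈ D := (hmem p.1).mpr (by simp)
    obtain ⟨D₁, D₂, rfl⟩ := List.append_of_mem hp1D
    have hnd := hD
    rw [List.nodup_append] at hnd
    obtain ⟨hD₁, hpD₂nd, hdisj⟩ := hnd
    have hp1notD₁ : p.1 ∉ D₁ := fun hm => hdisj _ hm _ (by simp) rfl
    have hp1notD₂ : p.1 ∉ D₂ := (List.nodup_cons.mp hpD₂nd).1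
    have hD₂ : D₂.Nodup := (List.nodup_cons.mp hpD₂nd).2
    have hne₁ : ∀ d ∈ D₁, d ≠ p.1 := fun d hd he => hp1notD₁ (he ▸ hd)
    have hne₂ : ∀ d ∈ D₂, d ≠ p.1 := fun d hd he => hp1notD₂ (he ▸ hd)
    have hpS' : ∀ z ∈ S', pvLexLe p z := (List.pairwise_cons.mp h).1
    have hS' : S'.Pairwise pvLexLe := (List.pairwise_cons.mp h).2
    have hsum : ∀ (f : Int → Int),
        ((D₁ ++ p.1 :: D₂).map f).sum = (D₁.map f).sum + f p.1 + (D₂.map f).sum := by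
      intro f; simp [List.sum_append]; ring
    by_cases hin : p.1 ∈ S'.map Prod.fst
    · -- p's day continues: the head of S' has the same day
      obtain ⟨q, r, rfl⟩ : ∃ q r, S' = q :: r := by
        cases S' with
        | nil => simp at hin
        | cons q r => exact ⟨q, r, rfl⟩
      have hq : q.1 = p.1 := by
        obtain ⟨z, hz, hz1⟩ := List.mem_map.mp hin
        rcases List.mem_cons.mp hz with rfl | hz'
        · exact hz1
        · have h1 := hpS' q (by simp)
          have h2 := (List.pairwise_cons.mp hS').1 z hz'
          unfold pvLexLe at h1 h2
          rcases h1 with h1 | h1 <;> rcases h2 with h2 | h2 <;> omega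
      have hmem' : ∀ d, d ∈ (D₁ ++ p.1 :: D₂) ↔ d ∈ (q :: r).map Prod.fst := by
        intro d
        rw [hmem d]
        simp only [List.map_cons, List.mem_cons]
        constructor
        · rintro (rfl | hd)
          · exact Or.inl hq.symm
          · exact hd
        · intro hd; exact Or.inr hd
      have hIH := ih (D₁ ++ p.1 :: D₂) hS' hD hmem'
      have hgaps : pvGaps (p :: q :: r)
          = (if q.2 - p.2 > 1 then (10:Int) else 0) + pvGaps (q :: r) := by
        simp [pvGaps, hq]
      rw [hgaps, hIH, hsum, hsum]
      have hterm : pvG (pvSlots p.1 (p :: q :: r))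
          = (if q.2 - p.2 > 1 then (10:Int) else 0) + pvG (pvSlots p.1 (q :: r)) := by
        rw [pv_slots_cons, if_pos rfl, pv_slots_cons, if_pos hq]
        simp [pvG]
      have hc₁ : D₁.map (fun d => pvG (pvSlots d (p :: q :: r)))
          = D₁.map (fun d => pvG (pvSlots d (q :: r))) := by
        apply List.map_congr_left
        intro d hd
        rw [pv_slots_cons, if_neg (fun he => hne₁ d hd he.symm)]
      have hc₂ : D₂.map (fun d => pvG (pvSlots d (p :: q :: r)))
          = D₂.map (fun d => pvG (pvSlots d (q :: r))) := by
        apply List.map_congr_left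
        intro d hd
        rw [pv_slots_cons, if_neg (fun he => hne₂ d hd he.symm)]
      rw [hterm, hc₁, hc₂]
      ring
    · -- p's day is finished: its slot list is the singleton [p.2]
      have hterm : pvG (pvSlots p.1 (p :: S')) = 0 := by
        rw [pv_slots_cons, if_pos rfl, pv_slots_nil_of_not_mem p.1 S' hin]
        simp [pvG]
      have hc₁ : D₁.map (fun d => pvG (pvSlots d (p :: S')))
          = D₁.map (fun d => pvG (pvSlots d S')) := by
        apply List.map_congr_left
        intro d hd
        rw [pv_slots_cons, if_neg (fun he => hne₁ d hd he.symm)]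
      have hc₂ : D₂.map (fun d => pvG (pvSlots d (p :: S')))
          = D₂.map (fun d => pvG (pvSlots d S')) := by
        apply List.map_congr_left
        intro d hd
        rw [pv_slots_cons, if_neg (fun he => hne₂ d hd he.symm)]
      have hEnd : (D₁ ++ D₂).Nodup := by
        refine List.Nodup.append hD₁ hD₂ ?_
        intro a ha hb
        exact hdisj _ ha _ (by simp [hb]) rfl
      have hmemE : ∀ d, d ∈ (D₁ ++ D₂) ↔ d ∈ S'.map Prod.fst := by
        intro d
        constructor
        · intro hd
          have hdD : d ∈ D₁ ++ p.1 :: D₂ := by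
            rcases List.mem_append.mp hd with h' | h'
            · exact List.mem_append.mpr (Or.inl h')
            · exact List.mem_append.mpr (Or.inr (List.mem_cons_of_mem _ h'))
          have := (hmem d).mp hdD
          simp only [List.map_cons, List.mem_cons] at this
          rcases this with rfl | hmS'
          · rcases List.mem_append.mp hd with h' | h'
            · exact absurd h' hp1notD₁
            · exact absurd h' hp1notD₂
          · exact hmS'
        · intro hd
          have hdD : d ∈ D₁ ++ p.1 :: D₂ := (hmem d).mpr (by simp [hd])
          have hdne : d ≠ p.1 := fun he => hin (he ▸ hd)
          rcases List.mem_append.mp hdD with h' | h'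
          · exact List.mem_append.mpr (Or.inl h')
          · rcases List.mem_cons.mp h' with rfl | h''
            · exact absurd rfl hdne
            · exact List.mem_append.mpr (Or.inr h'')
      have hIH := ih (D₁ ++ D₂) hS' hEnd hmemE
      have hgaps : pvGaps (p :: S') = pvGaps S' := by
        cases S' with
        | nil => simp [pvGaps]
        | cons q r =>
          have hq : p.1 ≠ q.1 := fun he => hin (by simp [← he])
          simp [pvGaps, hq]
      rw [hgaps, hIH, hsum, hterm, hc₁, hc₂]
      simp only [List.map_append, List.sum_append]
      ring

-- B's zip loop equals the structural per-day count
theorem pv_zipfold (slots : List Int) (pen : Int) :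
    (slots.zip slots.tail).foldl (fun pen2 ab => if ab.2 - ab.1 > 1 then pen2 + 10 else pen2) pen
      = pen + pvG slots := by
  induction slots generalizing pen with
  | nil => simp [pvG]
  | cons a t ih =>
    cases t with
    | nil => simp [pvG]
    | cons b r =>
      simp only [List.tail_cons, List.zip_cons_cons, List.foldl_cons]
      simp only [List.tail_cons] at ih
      rw [ih]
      simp only [pvG]
      split_ifs with hc
      · ring
      · ring

-- the per-course steps agree, for any list of kept lectures
theorem pv_step_core (pen : Int) (kept : List (List Int)) :
    (PySem.List.pyRange 0 (((PySem.List.sorted2 kept (fun x => x.getD 0 0) (fun x => x.getD 1 0)).length : Int) - 1) 1).foldl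
      (fun pen i =>
        let cur := PySem.List.pyGetD (PySem.List.sorted2 kept (fun x => x.getD 0 0) (fun x => x.getD 1 0)) i []
        let nxt := PySem.List.pyGetD (PySem.List.sorted2 kept (fun x => x.getD 0 0) (fun x => x.getD 1 0)) (i + 1) []
        if cur.getD 0 0 = nxt.getD 0 0 ∧ nxt.getD 1 0 - cur.getD 1 0 > 1 then pen + 10 else pen)
      pen
    = ((kept.map (fun l => (l.getD 0 0, l.getD 1 0))).foldl (fun ds p => PySem.Set.add ds p.1) PySem.Set.empty).foldl
        (fun pen d =>
          let slots := PySem.List.sorted (((kept.map (fun l => (l.getD 0 0, l.getD 1 0))).filter (fun p => decide (p.1 = d))).map Prod.snd) (fun t => t)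
          (slots.zip slots.tail).foldl (fun pen2 ab => if ab.2 - ab.1 > 1 then pen2 + 10 else pen2) pen)
        pen := by
  have hKfun : (fun (l : List Int) => (l.getD 0 0, l.getD 1 0)) = pvKey := rfl
  rw [hKfun, pv_sorted2_eq_lex, pv_rangefold]
  -- B's day list is the set of days of `pairs`
  have hdays : (kept.map pvKey).foldl (fun ds p => PySem.Set.add ds p.1) PySem.Set.empty
      = PySem.Set.ofList ((kept.map pvKey).map Prod.fst) := by
    rw [PySem.Set.ofList_eq_foldl, List.map_map, List.foldl_map, List.foldl_map]
    rfl
  rw [hdays]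
  -- B's inner zip loop is the structural per-day count
  have hbody : (fun (pen d : Int) =>
      let slots := PySem.List.sorted (((kept.map pvKey).filter (fun p => decide (p.1 = d))).map Prod.snd) (fun t => t)
      (slots.zip slots.tail).foldl (fun pen2 ab => if ab.2 - ab.1 > 1 then pen2 + 10 else pen2) pen)
    = (fun pen d => pen + pvG (PySem.List.sorted (((kept.map pvKey).filter (fun p => decide (p.1 = d))).map Prod.snd) (fun t => t))) := by
    funext pen d
    exact pv_zipfold _ pen
  rw [hbody, PySem.List.foldl_add]
  -- names for the sorted list and its key image
  have hKperm : ((PySem.List.sorted kept (fun x => toLex (pvKey x))).map pvKey).Perm (kept.map pvKey) :=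
    (PySem.List.sorted_perm kept (fun x => toLex (pvKey x)) false).map pvKey
  have hle : ∀ u v : Int × Int, toLex u ≤ toLex v → pvLexLe u v := by
    intro u v huv
    have hnlt : ¬ toLex v < toLex u := not_lt.mpr huv
    rw [Prod.Lex.toLex_lt_toLex] at hnlt
    unfold pvLexLe
    omega
  have hpairw : ((PySem.List.sorted kept (fun x => toLex (pvKey x))).map pvKey).Pairwise pvLexLe := by
    refine List.pairwise_map.mpr ?_
    exact (PySem.List.sorted_pairwise kept (fun x => toLex (pvKey x))).imp (fun hab => hle _ _ hab)
  -- each day's sorted timeslot list is that day's block of the sorted key list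
  have hslot : ∀ d : Int,
      PySem.List.sorted (((kept.map pvKey).filter (fun p => decide (p.1 = d))).map Prod.snd) (fun t => t)
        = pvSlots d ((PySem.List.sorted kept (fun x => toLex (pvKey x))).map pvKey) := by
    intro d
    apply PySem.List.sorted_id_eq_of_perm_of_pairwise
    · exact ((hKperm.filter _).map _)
    · refine List.pairwise_map.mpr ?_
      have hf : (((PySem.List.sorted kept (fun x => toLex (pvKey x))).map pvKey).filter
          (fun p => decide (p.1 = d))).Pairwise pvLexLe := hpairw.filter _
      refine hf.imp_of_mem ?_
      intro a b ha hb hab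
      have ha' : a.1 = d := by simpa using List.of_mem_filter ha
      have hb' : b.1 = d := by simpa using List.of_mem_filter hb
      unfold pvLexLe at hab
      omega
  have hfun : (fun d => pvG (PySem.List.sorted (((kept.map pvKey).filter (fun p => decide (p.1 = d))).map Prod.snd) (fun t => t)))
      = (fun d => pvG (pvSlots d ((PySem.List.sorted kept (fun x => toLex (pvKey x))).map pvKey))) := by
    funext d
    exact congrArg pvG (hslot d)
  rw [hfun]
  -- the day set of `pairs` lists exactly the days of the sorted key list, without duplicates
  have hmain := pv_main ((PySem.List.sorted kept (fun x => toLex (pvKey x))).map pvKey)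
    (PySem.Set.ofList ((kept.map pvKey).map Prod.fst)) hpairw
    (PySem.Set.nodup_ofList _)
    (by
      intro d
      rw [PySem.Set.mem_ofList]
      exact ((hKperm.map Prod.fst).mem_iff).symm)
  rw [← hmain]

-- the per-course steps agree (in the exact shape they take inside the two ports)
theorem pv_step (pen : Int) (lectures : List (List Int)) :
    (let lectures := if lectures.isEmpty = false then lectures else [([] : List Int)]
     let lectures := lectures.filter (fun l => decide (2 ≤ l.length))
     let sorted_lectures := PySem.List.sorted2 lectures (fun x => x.getD 0 0) (fun x => x.getD 1 0)
     (PySem.List.pyRange 0 ((sorted_lectures.length : Int) - 1) 1).foldl (fun pen i =>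
       let cur := PySem.List.pyGetD sorted_lectures i []
       let nxt := PySem.List.pyGetD sorted_lectures (i + 1) []
       if cur.getD 0 0 = nxt.getD 0 0 ∧ nxt.getD 1 0 - cur.getD 1 0 > 1 then pen + 10 else pen)
       pen)
    = (let lectures := if lectures.isEmpty = false then lectures else [([] : List Int)]
       let lectures := lectures.filter (fun l => decide (2 ≤ l.length))
       let pairs := lectures.map (fun l => (l.getD 0 0, l.getD 1 0))
       let days := pairs.foldl (fun ds p => PySem.Set.add ds p.1) PySem.Set.empty
       days.foldl (fun pen d =>
         let slots := PySem.List.sorted ((pairs.filter (fun p => decide (p.1 = d))).map Prod.snd) (fun t => t)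
         (slots.zip slots.tail).foldl (fun pen2 ab => if ab.2 - ab.1 > 1 then pen2 + 10 else pen2) pen)
         pen) :=
  pv_step_core pen ((if lectures.isEmpty = false then lectures else [([] : List Int)]).filter (fun l => decide (2 ≤ l.length)))

-- ===== VERDICT (by name: the statement is the Claim_ definition above) =====
theorem calculate_class_neighbors_penalty_spec : Claim_equal_calculate_class_neighbors_penalty := by
  intro timetable data _
  unfold Spec_calculate_class_neighbors_penalty calculate_class_neighbors_penalty calculate_class_neighbors_penalty_alt
  apply PySem.List.foldl_congr_mem
  intro pen cl _
  dsimp only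
  exact pv_step pen cl.2
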